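-- pv_equiv track=rewrite | github.com/Oxbrimp/Encryption-Test | classes/pad_rotate.py | unpad1
-- ===== SOURCE A (Python) =====
-- def unpad1(bitstr, key1):
--     kd = list(map(int, key1))
--     out, i, j = [], 0, 0
--     while j < len(bitstr):
--         out.append(bitstr[j])
--         j += 1 + kd[i % len(kd)]
--         i += 1
--     return "".join(out)
-- ===== SOURCE B (Python) =====
-- def unpad1(bitstr, key1):
--     kd = list(map(int, key1))
--     out = []
--     skip = 0
--     i = 0
--     for ch in bitstr:
--         if skip > 0:
--             skip -= 1
--             continue
--         out.append(ch)
--         skip = kd[i % len(kd)]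
--         i += 1
--     return "".join(out)
-- ===== Notes on version B (the rewrite author's own statement) =====
-- stated objective: alternative
-- what changed: Replaces A's index-jump while loop (j += 1 + kd[i % len(kd)]) with a single for-loop over every character that maintains a skip countdown, appending a char only when the countdown is zero.
import Mathlib
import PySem

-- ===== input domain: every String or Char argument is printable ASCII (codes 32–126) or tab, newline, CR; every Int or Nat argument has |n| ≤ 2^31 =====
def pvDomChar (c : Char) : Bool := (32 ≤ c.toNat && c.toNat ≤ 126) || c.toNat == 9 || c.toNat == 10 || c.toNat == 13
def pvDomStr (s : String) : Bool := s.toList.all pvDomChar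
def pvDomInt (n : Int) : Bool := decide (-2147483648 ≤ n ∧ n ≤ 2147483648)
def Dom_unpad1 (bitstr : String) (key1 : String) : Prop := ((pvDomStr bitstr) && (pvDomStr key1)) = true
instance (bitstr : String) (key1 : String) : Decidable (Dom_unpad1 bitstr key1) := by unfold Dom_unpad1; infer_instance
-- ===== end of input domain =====

-- B replaces A's index-jump loop with a single skip-countdown scan over every character
-- (objective: alternative decomposition, same cost class).

-- shared first line of both Pythons: kd = list(map(int, key1)).
-- int(c) for the one-character string c → PySem.Int.ofStr? (String.ofList [c]), which is
-- PySem.Int.ofChars? [c] (lemma ofStr?_ofList); under Pre_ every char is a digit so the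
-- option is some; the .getD 0 is never taken inside Pre_.
def pvKd (key1 : String) : List Int :=
  key1.toList.map (fun c => (PySem.Int.ofChars? [c]).getD 0)

-- kd[i % len(kd)]; under Pre_ (key1 ≠ "" whenever the loop body runs) the index is in
-- range, so the .getD 0 is never taken inside Pre_ (len(kd) = 0 would be Python's
-- ZeroDivisionError, excluded by Pre_).
def pvStep (kd : List Int) (i : Nat) : Int :=
  (PySem.List.pyGet? kd ((i : Int) % (kd.length : Int))).getD 0

-- ===== PORT A =====
-- while j < len(bitstr): out.append(bitstr[j]); j += 1 + kd[i % len(kd)]; i += 1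
-- j stays a Nat (it starts at 0 and under Pre_ each step adds 1 + digit ≥ 1);
-- (pvStep).toNat is exact under Pre_, where every kd entry is a digit 0–9.
def unpad1LoopA (kd : List Int) (cs : List Char) (i j : Nat) : List Char :=
  if h : j < cs.length then
    cs[j] :: unpad1LoopA kd cs (i + 1) (j + 1 + (pvStep kd i).toNat)
  else []
termination_by cs.length - j
decreasing_by omega

def unpad1 (bitstr : String) (key1 : String) : String :=
  String.ofList (unpad1LoopA (pvKd key1) bitstr.toList 0 0)

-- ===== PORT B =====
-- for ch in bitstr: if skip > 0: skip -= 1; continue; else append ch, skip = kd[i % len(kd)], i += 1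
def unpad1LoopB (kd : List Int) (cs : List Char) (skip : Int) (i : Nat) : List Char :=
  match cs with
  | [] => []
  | c :: rest =>
    if skip > 0 then unpad1LoopB kd rest (skip - 1) i
    else c :: unpad1LoopB kd rest (pvStep kd i) (i + 1)

def unpad1_alt (bitstr : String) (key1 : String) : String :=
  String.ofList (unpad1LoopB (pvKd key1) bitstr.toList 0 0)

-- ===== PRECONDITION & SPEC =====
-- Pre_ excludes exactly the inputs on which the Python A raises: a non-digit character
-- in key1 (int(c) → ValueError) and a non-empty bitstr with empty key1 (i % 0 → ZeroDivisionError).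
def Pre_unpad1 (bitstr : String) (key1 : String) : Prop :=
  key1.toList.all (fun c => c.isDigit) = true ∧ (bitstr.length = 0 ∨ key1.length ≠ 0)
instance (bitstr : String) (key1 : String) : Decidable (Pre_unpad1 bitstr key1) := by
  unfold Pre_unpad1; infer_instance

def pvWitness_unpad1 : String × String := ("abcdef", "102")

def Spec_unpad1 (bitstr : String) (key1 : String) (out : String) : Prop := out = unpad1_alt bitstr key1
instance (bitstr : String) (key1 : String) (out : String) : Decidable (Spec_unpad1 bitstr key1 out) := by unfold Spec_unpad1; infer_instance

-- ===== CLAIM (what is proved, stated in full; the proofs are below) =====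
def Claim_equal_unpad1 : Prop := ∀ (bitstr : String) (key1 : String), Dom_unpad1 bitstr key1 → Pre_unpad1 bitstr key1 → Spec_unpad1 bitstr key1 (unpad1 bitstr key1)

-- ===== LEMMAS AND PROOFS =====

-- a positive Nat-valued skip just drops that many characters
theorem loopB_skip_drop (kd : List Int) (rest : List Char) (k i : Nat) :
    unpad1LoopB kd rest (k : Int) i = unpad1LoopB kd (rest.drop k) 0 i := by
  induction rest generalizing k with
  | nil => cases k <;> simp [unpad1LoopB]
  | cons c t ih =>
    cases k with
    | zero => simp
    | succ m =>
      simp [unpad1LoopB]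
      exact ih m

theorem pvStep_nonneg (kd : List Int) (i : Nat) (hkd : ∀ x ∈ kd, 0 ≤ x) :
    0 ≤ pvStep kd i := by
  unfold pvStep
  cases h : PySem.List.pyGet? kd ((i : Int) % (kd.length : Int)) with
  | none => simp
  | some x => simpa using hkd x (PySem.List.mem_of_pyGet?_eq_some kd h)

theorem loopA_eq_loopB (kd : List Int) (cs : List Char)
    (hkd : ∀ x ∈ kd, 0 ≤ x) :
    ∀ (n i j : Nat), cs.length - j ≤ n →
      unpad1LoopA kd cs i j = unpad1LoopB kd (cs.drop j) 0 i := by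
  intro n
  induction n with
  | zero =>
    intro i j hj
    rw [unpad1LoopA, dif_neg (by omega), List.drop_eq_nil_of_le (by omega)]
    rfl
  | succ n IH =>
    intro i j hj
    by_cases h : j < cs.length
    · have hs : 0 ≤ pvStep kd i := pvStep_nonneg kd i hkd
      rw [unpad1LoopA, dif_pos h, List.drop_eq_getElem_cons h]
      simp only [unpad1LoopB]
      rw [if_neg (show ¬ ((0:Int) > 0) by omega)]
      rw [IH (i + 1) (j + 1 + (pvStep kd i).toNat) (by omega)]
      congr 1
      conv_rhs => rw [(Int.toNat_of_nonneg hs).symm, loopB_skip_drop, List.drop_drop]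
    · rw [unpad1LoopA, dif_neg h, List.drop_eq_nil_of_le (by omega)]
      rfl

-- a digit character is one of the ten ASCII digits
theorem digit_mem (c : Char) (h : c.isDigit = true) :
    c ∈ ['0','1','2','3','4','5','6','7','8','9'] := by
  simp [Char.isDigit] at h
  obtain ⟨h1, h2⟩ := h
  have hv1 : 48 ≤ c.val.toNat := UInt32.le_iff_toNat_le.mp h1
  have hv2 : c.val.toNat ≤ 57 := UInt32.le_iff_toNat_le.mp h2
  have hchar : ∀ n, 48 ≤ n → n ≤ 57 → ∀ (c' : Char), c'.val.toNat = n →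
      c' ∈ ['0','1','2','3','4','5','6','7','8','9'] := by
    intro n hn1 hn2 c' hc'
    have hce : ∀ (d : Char), c'.val.toNat = d.val.toNat → c' = d := by
      intro d hd
      exact Char.ext (UInt32.toNat_inj.mp hd)
    interval_cases n
    · have hh := hce '0' (by rw [hc']; decide); subst hh; simp
    · have hh := hce '1' (by rw [hc']; decide); subst hh; simp
    · have hh := hce '2' (by rw [hc']; decide); subst hh; simp
    · have hh := hce '3' (by rw [hc']; decide); subst hh; simp
    · have hh := hce '4' (by rw [hc']; decide); subst hh; simp
    · have hh := hce '5' (by rw [hc']; decide); subst hh; simp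
    · have hh := hce '6' (by rw [hc']; decide); subst hh; simp
    · have hh := hce '7' (by rw [hc']; decide); subst hh; simp
    · have hh := hce '8' (by rw [hc']; decide); subst hh; simp
    · have hh := hce '9' (by rw [hc']; decide); subst hh; simp
  exact hchar c.val.toNat hv1 hv2 c rfl

theorem kd_nonneg (key1 : String)
    (hd : key1.toList.all (fun c => c.isDigit) = true) :
    ∀ x ∈ pvKd key1, 0 ≤ x := by
  intro x hx
  unfold pvKd at hx
  obtain ⟨c, hc, rfl⟩ := List.mem_map.mp hx
  have hdig : c.isDigit = true := by
    have := List.all_eq_true.mp hd c hc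
    simpa using this
  have hm := digit_mem c hdig
  fin_cases hm <;> decide

-- ===== VERDICT (by name: the statement is the Claim_ definition above) =====
theorem unpad1_spec : Claim_equal_unpad1 := by
  intro bitstr key1 _ hpre
  unfold Spec_unpad1 unpad1 unpad1_alt
  rw [loopA_eq_loopB (pvKd key1) bitstr.toList (kd_nonneg key1 hpre.1)
        bitstr.toList.length 0 0 (by omega)]
  simp
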